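-- pv_equiv track=rewrite | github.com/Cytus-LY/selena-ai | app.py | adaptive_font_size
-- ===== SOURCE A (Python) =====
-- def adaptive_font_size(text: str, default: int, minimum: int, breakpoints=None) -> int:
--     text = (text or "").strip()
--     breakpoints = breakpoints or []
--     size = default
--     for char_count, candidate in sorted(breakpoints):
--         if len(text) > char_count:
--             size = min(size, candidate)
--     return max(minimum, size)
-- ===== SOURCE B (Python) =====
-- def adaptive_font_size(text: str, default: int, minimum: int, breakpoints=None) -> int:
--     n = len((text or "").strip())
--     size = default
--     # Sort by CANDIDATE size ascending: the first entry whose threshold is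
--     # exceeded is already the smallest qualifying candidate, so stop there.
--     for char_count, candidate in sorted(breakpoints or [], key=lambda p: p[1]):
--         if n > char_count:
--             size = min(size, candidate)
--             break
--     return max(minimum, size)
-- ===== Notes on version B (the rewrite author's own statement) =====
-- stated objective: alternative
-- what changed: Replaces A's running-min fold over the threshold-sorted list with an early-exit search: sort by candidate size instead, and stop at the first entry whose threshold is exceeded, since in candidate order that first hit is already the minimal qualifying candidate.
import Mathlib
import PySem

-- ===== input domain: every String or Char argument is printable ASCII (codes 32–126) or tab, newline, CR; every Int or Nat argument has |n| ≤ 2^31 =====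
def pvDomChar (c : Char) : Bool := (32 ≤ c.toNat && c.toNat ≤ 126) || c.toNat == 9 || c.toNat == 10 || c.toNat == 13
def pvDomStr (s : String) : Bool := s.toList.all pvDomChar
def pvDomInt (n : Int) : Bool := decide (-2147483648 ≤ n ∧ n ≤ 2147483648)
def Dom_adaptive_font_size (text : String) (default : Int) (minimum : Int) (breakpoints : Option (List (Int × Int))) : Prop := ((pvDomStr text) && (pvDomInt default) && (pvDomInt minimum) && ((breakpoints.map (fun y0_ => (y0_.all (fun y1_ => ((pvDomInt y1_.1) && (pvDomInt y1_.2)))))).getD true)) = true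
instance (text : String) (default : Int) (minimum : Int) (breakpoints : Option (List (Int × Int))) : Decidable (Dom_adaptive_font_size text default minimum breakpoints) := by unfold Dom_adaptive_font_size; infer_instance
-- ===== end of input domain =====

-- B replaces A's running-min fold over the threshold-sorted list with an early-exit search
-- over the candidate-sorted list (first qualifying entry = minimal candidate); objective: alternative.


-- ===== PORT A =====
def adaptive_font_size (text : String) (default : Int) (minimum : Int) (breakpoints : Option (List (Int × Int))) : Int :=
  let t : String := PySem.Str.strip text          -- text = (text or "").strip()
  let bp : List (Int × Int) := breakpoints.getD []  -- breakpoints = breakpoints or []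
  -- for char_count, candidate in sorted(breakpoints): if len(text) > char_count: size = min(size, candidate)
  let size : Int :=
    (PySem.List.sorted2 bp (·.1) (·.2)).foldl
      (fun size p => if ((PySem.Str.len t : Int) > p.1) then min size p.2 else size) default
  max minimum size

-- ===== PORT B =====
-- the for-loop with break, as structural recursion
def pvLoopB (n : Int) : List (Int × Int) → Int → Int
  | [], size => size
  | p :: t, size => if n > p.1 then min size p.2 else pvLoopB n t size

def adaptive_font_size_alt (text : String) (default : Int) (minimum : Int) (breakpoints : Option (List (Int × Int))) : Int :=
  let n : Int := PySem.Str.len (PySem.Str.strip text)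
  -- for char_count, candidate in sorted(breakpoints or [], key=lambda p: p[1]): … break
  let size : Int := pvLoopB n (PySem.List.sorted (breakpoints.getD []) (·.2)) default
  max minimum size

-- ===== PRECONDITION & SPEC =====
def Spec_adaptive_font_size (text : String) (default : Int) (minimum : Int) (breakpoints : Option (List (Int × Int))) (out : Int) : Prop := out = adaptive_font_size_alt text default minimum breakpoints
instance (text : String) (default : Int) (minimum : Int) (breakpoints : Option (List (Int × Int))) (out : Int) : Decidable (Spec_adaptive_font_size text default minimum breakpoints out) := by unfold Spec_adaptive_font_size; infer_instance

-- ===== CLAIM =====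
def Claim_equal_adaptive_font_size : Prop := ∀ (text : String) (default : Int) (minimum : Int) (breakpoints : Option (List (Int × Int))), Dom_adaptive_font_size text default minimum breakpoints → Spec_adaptive_font_size text default minimum breakpoints (adaptive_font_size text default minimum breakpoints)

-- ===== LEMMAS AND PROOFS =====

-- A's loop body
def pvStep (n : Int) (size : Int) (p : Int × Int) : Int :=
  if n > p.1 then min size p.2 else size

-- A's fold is order-insensitive
theorem pvStep_perm (n : Int) {l₁ l₂ : List (Int × Int)} (h : l₁.Perm l₂) (d : Int) :
    l₁.foldl (pvStep n) d = l₂.foldl (pvStep n) d := by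
  refine h.foldl_eq' (fun a _ b _ c => ?_) d
  unfold pvStep
  split_ifs <;> simp [min_assoc, min_comm a.2 b.2]

-- once the accumulator is ≤ every remaining candidate, A's fold keeps it
theorem foldl_pvStep_const (n : Int) (t : List (Int × Int)) (acc : Int)
    (h : ∀ q ∈ t, acc ≤ q.2) : t.foldl (pvStep n) acc = acc := by
  induction t with
  | nil => rfl
  | cons q t ih =>
    have hq : acc ≤ q.2 := h q (by simp)
    have : pvStep n acc q = acc := by
      unfold pvStep; split_ifs <;> simp [min_eq_left hq]
    rw [List.foldl_cons, this]
    exact ih (fun r hr => h r (by simp [hr]))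

-- on a candidate-ascending list, B's early-exit loop equals A's full fold
theorem pvLoopB_eq_foldl (n : Int) (l : List (Int × Int)) (d : Int)
    (h : l.Pairwise (fun a b => a.2 ≤ b.2)) :
    pvLoopB n l d = l.foldl (pvStep n) d := by
  induction l generalizing d with
  | nil => rfl
  | cons p t ih =>
    have hp : ∀ q ∈ t, p.2 ≤ q.2 := (List.pairwise_cons.mp h).1
    have ht : t.Pairwise (fun a b => a.2 ≤ b.2) := (List.pairwise_cons.mp h).2
    by_cases hc : n > p.1
    · simp only [pvLoopB, hc, if_pos, List.foldl_cons, pvStep]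
      exact (foldl_pvStep_const n t (min d p.2)
        (fun q hq => le_trans (min_le_right _ _) (hp q hq))).symm
    · simp only [pvLoopB, hc, List.foldl_cons, pvStep, if_false]
      exact ih d ht

-- ===== VERDICT =====
theorem adaptive_font_size_spec : Claim_equal_adaptive_font_size := by
  intro text default minimum breakpoints _
  unfold Spec_adaptive_font_size adaptive_font_size adaptive_font_size_alt
  dsimp only
  congr 1
  rw [pvLoopB_eq_foldl _ _ _ (PySem.List.sorted_pairwise (xs := breakpoints.getD []) (key := (·.2)))]
  exact pvStep_perm _ (((PySem.List.sorted2_perm (xs := breakpoints.getD []) (k1 := (·.1)) (k2 := (·.2)) (rev := false))).trans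
    (PySem.List.sorted_perm (xs := breakpoints.getD []) (key := (·.2)) (rev := false)).symm) default
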